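-- pv_equiv track=rewrite | github.com/zeppeki/project-euler-first100 | problems/problem_072.py | count_reduced_fractions_range
-- ===== SOURCE A (Python) =====
-- def euler_totient_prime_factorization(n: int) -> int:
--     """
--     素因数分解を使用したオイラーのトーシェント関数φ(n)の計算
--     φ(n) = n × ∏(1 - 1/p) for all prime factors p
--
--     時間計算量: O(√n)
--     空間計算量: O(log n)
--
--     Args:
--         n: 計算対象の整数
--
--     Returns:
--         φ(n)の値
--     """
--     if n <= 1:
--         return n
--
--     result = n
--     temp = n
--
--     # 2で割り切れる場合
--     if temp % 2 == 0:
--         result = result * (2 - 1) // 2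
--         while temp % 2 == 0:
--             temp //= 2
--
--     # 3以上の奇数の素因数
--     i = 3
--     while i * i <= temp:
--         if temp % i == 0:
--             result = result * (i - 1) // i
--             while temp % i == 0:
--                 temp //= i
--         i += 2
--
--     # tempが1より大きい場合、それは素数
--     if temp > 1:
--         result = result * (temp - 1) // temp
--
--     return result
--
-- def count_reduced_fractions_range(start: int, end: int) -> int:
--     """
--     指定範囲内の既約真分数の数を計算
--
--     Args:
--         start: 分母の下限値
--         end: 分母の上限値
--
--     Returns:
--         指定範囲内の既約真分数の総数
--     """
--     if start < 2:
--         start = 2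
--     if end < start:
--         return 0
--
--     total = 0
--     for d in range(start, end + 1):
--         phi_d = euler_totient_prime_factorization(d)
--         total += phi_d
--
--     return total
-- ===== SOURCE B (Python) =====
-- def count_reduced_fractions_range(start: int, end: int) -> int:
--     """Sum of Euler's totient over denominators in [max(start,2), end], computed
--     with a segmented totient sieve over the range, using trial factors up to sqrt(end)
--     shared across the whole segment instead of factorizing each number separately."""
--     if start < 2:
--         start = 2
--     if end < start:
--         return 0
--     lo = start
--     n = end - lo + 1
--     rem = list(range(lo, end + 1))   # remaining unfactored part of each denominator
--     phi = [1] * n                    # totient contribution of the factors removed so far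
--     r = 0
--     while (r + 1) * (r + 1) <= end:
--         r += 1
--     for p in range(2, r + 1):
--         m = ((lo + p - 1) // p) * p  # first multiple of p in the segment
--         while m <= end:
--             i = m - lo
--             if rem[i] % p == 0:      # fires only when p is prime
--                 e = 0
--                 while rem[i] % p == 0:
--                     rem[i] //= p
--                     e += 1
--                 phi[i] *= (p - 1) * p ** (e - 1)
--             m += p
--     return sum(phi[i] * (rem[i] - 1 if rem[i] > 1 else 1) for i in range(n))
-- ===== Notes on version B (the rewrite author's own statement) =====
-- stated objective: faster
-- what changed: A factorizes every denominator separately by trial division up to sqrt(d); B runs one segmented totient sieve over [start, end], striding each trial factor p <= sqrt(end) across the whole segment and finishing each slot with its single remaining large prime.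
import Mathlib
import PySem

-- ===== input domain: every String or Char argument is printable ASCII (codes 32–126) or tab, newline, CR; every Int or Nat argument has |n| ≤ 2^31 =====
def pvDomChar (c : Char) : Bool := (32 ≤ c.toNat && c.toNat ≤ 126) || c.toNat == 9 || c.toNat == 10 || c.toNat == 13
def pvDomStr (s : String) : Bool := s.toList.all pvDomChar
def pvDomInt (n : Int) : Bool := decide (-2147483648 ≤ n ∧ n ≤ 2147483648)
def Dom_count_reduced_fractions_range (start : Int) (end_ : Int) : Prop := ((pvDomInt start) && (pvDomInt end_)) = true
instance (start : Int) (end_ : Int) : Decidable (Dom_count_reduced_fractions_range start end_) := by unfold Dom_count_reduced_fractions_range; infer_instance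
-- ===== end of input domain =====

-- B replaces A's per-number trial-division totient with one segmented totient sieve over [start, end] sharing trial factors up to sqrt(end) (faster).


-- ===== PORT A =====
-- All integers A manipulates are nonnegative (n ≥ 2 inside the helper), so the
-- ports work on ℕ, where Python's `//` and `%` coincide with Nat `/` and `%`.

-- `while temp % i == 0: temp //= i` (the guards `2 ≤ p`, `0 < t` only ensure
-- totality; they hold at every Python call site)
def removeFac (t p : ℕ) : ℕ :=
  if h : 2 ≤ p ∧ 0 < t ∧ t % p = 0 then removeFac (t / p) p else t
termination_by t
decreasing_by exact Nat.div_lt_self h.2.1 h.1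

theorem removeFac_le (t p : ℕ) : removeFac t p ≤ t := by
  fun_induction removeFac with
  | case1 t h ih => exact le_trans ih (Nat.div_le_self _ _)
  | case2 => exact le_rfl

-- `while i * i <= temp:` — returns the final (result, temp).
-- (guard `3 ≤ i` only for totality; Python's i starts at 3 and grows)
def loopA (result temp i : ℕ) : ℕ × ℕ :=
  if h : 3 ≤ i ∧ i * i ≤ temp then
    if temp % i = 0 then loopA (result * (i - 1) / i) (removeFac temp i) (i + 2)
    else loopA result temp (i + 2)
  else (result, temp)
termination_by temp + 1 - i
decreasing_by
  · have h1 : i < i * i := by nlinarith [h.1]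
    have h2 : removeFac temp i ≤ temp := removeFac_le temp i
    omega
  · have h1 : i < i * i := by nlinarith [h.1]
    omega

def eulerTotientA (n : ℕ) : ℕ :=
  if n ≤ 1 then n
  else
    let result := n
    let temp := n
    let rt : ℕ × ℕ :=
      if temp % 2 = 0 then (result * (2 - 1) / 2, removeFac temp 2) else (result, temp)
    let rt2 := loopA rt.1 rt.2 3
    if 1 < rt2.2 then rt2.1 * (rt2.2 - 1) / rt2.2 else rt2.1

def count_reduced_fractions_range (start : Int) (end_ : Int) : Int :=
  let start := if start < 2 then 2 else start
  if end_ < start then 0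
  else
    -- for d in range(start, end + 1): total += phi(d)   (start ≥ 2, end ≥ start here)
    Int.ofNat ((List.range' start.toNat (end_.toNat + 1 - start.toNat)).foldl
      (fun total d => total + eulerTotientA d) 0)

-- ===== PORT B =====
-- `while (r + 1) * (r + 1) <= end: r += 1`
def isqrtLoop (e r : ℕ) : ℕ :=
  if (r + 1) * (r + 1) ≤ e then isqrtLoop e (r + 1) else r
termination_by e - r
decreasing_by
  have : r + 1 ≤ (r + 1) * (r + 1) := Nat.le_mul_of_pos_left _ (by omega)
  omega

-- `e = 0; while rem[i] % p == 0: rem[i] //= p; e += 1` — returns (new rem[i], e)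
-- (guards `2 ≤ p`, `0 < t` only ensure totality; they hold at every Python call site)
def removeCnt (t p : ℕ) : ℕ × ℕ :=
  if h : 2 ≤ p ∧ 0 < t ∧ t % p = 0 then
    ((removeCnt (t / p) p).1, (removeCnt (t / p) p).2 + 1)
  else (t, 0)
termination_by t
decreasing_by exact Nat.div_lt_self h.2.1 h.1

-- `while m <= end: i = m - lo; if rem[i] % p == 0: …; m += p`
def innerB (rem phi : List ℕ) (p m lo hi : ℕ) : List ℕ × List ℕ :=
  if h : 2 ≤ p ∧ m ≤ hi then
    if (rem.getD (m - lo) 0) % p = 0 then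
      innerB (rem.set (m - lo) (removeCnt (rem.getD (m - lo) 0) p).1)
        (phi.set (m - lo) (phi.getD (m - lo) 0
          * ((p - 1) * p ^ ((removeCnt (rem.getD (m - lo) 0) p).2 - 1))))
        p (m + p) lo hi
    else innerB rem phi p (m + p) lo hi
  else (rem, phi)
termination_by hi + 1 - m
decreasing_by all_goals omega

def count_reduced_fractions_range_alt (start : Int) (end_ : Int) : Int :=
  let start := if start < 2 then 2 else start
  if end_ < start then 0
  else
    let lo := start.toNat
    let hi := end_.toNat
    let n := hi + 1 - lo              -- = end - lo + 1 (lo ≤ hi here)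
    let r := isqrtLoop hi 0
    -- rem = list(range(lo, end + 1)); phi = [1] * n; for p in range(2, r + 1): …
    let rp := (List.range' 2 (r + 1 - 2)).foldl
      (fun (st : List ℕ × List ℕ) p => innerB st.1 st.2 p ((lo + p - 1) / p * p) lo hi)
      (List.range' lo n, List.replicate n 1)
    -- sum(phi[i] * (rem[i] - 1 if rem[i] > 1 else 1) for i in range(n))
    Int.ofNat ((List.range n).foldl
      (fun total i =>
        total + rp.2.getD i 0 * (if 1 < rp.1.getD i 0 then rp.1.getD i 0 - 1 else 1)) 0)

-- ===== PRECONDITION & SPEC =====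
def Spec_count_reduced_fractions_range (start : Int) (end_ : Int) (out : Int) : Prop := out = count_reduced_fractions_range_alt start end_
instance (start : Int) (end_ : Int) (out : Int) : Decidable (Spec_count_reduced_fractions_range start end_ out) := by unfold Spec_count_reduced_fractions_range; infer_instance

-- ===== CLAIM (what is proved, stated in full; the proofs are below) =====
def Claim_equal_count_reduced_fractions_range : Prop := ∀ (start : Int) (end_ : Int), Dom_count_reduced_fractions_range start end_ → Spec_count_reduced_fractions_range start end_ (count_reduced_fractions_range start end_)

-- ===== LEMMAS AND PROOFS =====

-- The common spec: phiS n = (n / ∏ p∈pf n, p) * ∏ p∈pf n, (p-1)  (= Euler's φ for n ≥ 1)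
def phiS (n : ℕ) : ℕ := (n / ∏ q ∈ n.primeFactors, q) * ∏ q ∈ n.primeFactors, (q - 1)

theorem prod_primeFactors_pos (F : Finset ℕ) (hF : ∀ q ∈ F, q.Prime) :
    0 < ∏ q ∈ F, q := by
  apply Finset.prod_pos
  intro q hq; exact (hF q hq).pos

-- removeFac facts
theorem removeFac_dvd (t p : ℕ) : removeFac t p ∣ t := by
  fun_induction removeFac with
  | case1 t h ih => exact dvd_trans ih (Nat.div_dvd_of_dvd (Nat.dvd_of_mod_eq_zero h.2.2))
  | case2 => exact dvd_rfl

theorem removeFac_pos (t p : ℕ) (ht : 0 < t) : 0 < removeFac t p := by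
  fun_induction removeFac with
  | case1 t h ih =>
    exact ih (Nat.div_pos (Nat.le_of_dvd h.2.1 (Nat.dvd_of_mod_eq_zero h.2.2)) (by omega))
  | case2 => exact ht

theorem removeFac_not_dvd (t p : ℕ) (hp : 2 ≤ p) (ht : 0 < t) : ¬ p ∣ removeFac t p := by
  fun_induction removeFac with
  | case1 t h ih =>
    exact ih (Nat.div_pos (Nat.le_of_dvd h.2.1 (Nat.dvd_of_mod_eq_zero h.2.2)) (by omega))
  | case2 t h =>
    intro hd
    exact h ⟨hp, ht, (Nat.mod_eq_zero_of_dvd hd)⟩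

theorem removeFac_dvd_iff (t p q : ℕ) (hp : p.Prime) (hq : q.Prime) (hne : q ≠ p) :
    q ∣ removeFac t p ↔ q ∣ t := by
  constructor
  · intro h; exact dvd_trans h (removeFac_dvd t p)
  · intro h
    fun_induction removeFac with
    | case1 t hg ih =>
      apply ih
      have hco : Nat.Coprime q p := (Nat.coprime_primes hq hp).mpr hne
      refine hco.dvd_of_dvd_mul_right ?_
      rwa [Nat.div_mul_cancel (Nat.dvd_of_mod_eq_zero hg.2.2)]
    | case2 t hg => exact h

theorem removeFac_primeFactors (t p : ℕ) (hp : p.Prime) (ht : 0 < t) :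
    (removeFac t p).primeFactors = t.primeFactors.erase p := by
  ext q
  simp only [Finset.mem_erase, Nat.mem_primeFactors]
  constructor
  · rintro ⟨hq, hdvd, -⟩
    have hne : q ≠ p := by
      rintro rfl
      exact removeFac_not_dvd t q hq.two_le ht hdvd
    exact ⟨hne, hq, dvd_trans hdvd (removeFac_dvd t p), by omega⟩
  · rintro ⟨hne, hq, hdvd, -⟩
    have := removeFac_pos t p ht
    exact ⟨hq, (removeFac_dvd_iff t p q hp hq hne).mpr hdvd, by omega⟩

-- i is prime when it divides temp and all prime factors of temp are ≥ i
theorem prime_of_dvd_min (i temp : ℕ) (hi : 2 ≤ i) (hd : i ∣ temp) (ht : 0 < temp)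
    (hmin : ∀ q ∈ temp.primeFactors, i ≤ q) : i.Prime := by
  have h1 : i.minFac.Prime := Nat.minFac_prime (by omega)
  have h2 : i.minFac ∣ temp := dvd_trans (Nat.minFac_dvd i) hd
  have h3 : i.minFac ∈ temp.primeFactors := Nat.mem_primeFactors.mpr ⟨h1, h2, by omega⟩
  have h4 : i ≤ i.minFac := hmin _ h3
  have h5 : i.minFac ≤ i := Nat.minFac_le (by omega)
  exact Nat.prime_def_minFac.mpr ⟨hi, by omega⟩

-- the loop+tail of A computes the product formula
theorem loopA_spec (result temp i : ℕ) (hodd : Odd i) (hi : 3 ≤ i) (ht : 0 < temp)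
    (hmin : ∀ q ∈ temp.primeFactors, i ≤ q)
    (hdvd : (∏ q ∈ temp.primeFactors, q) ∣ result) :
    (if 1 < (loopA result temp i).2 then
        (loopA result temp i).1 * ((loopA result temp i).2 - 1) / (loopA result temp i).2
      else (loopA result temp i).1)
      = (result / ∏ q ∈ temp.primeFactors, q) * ∏ q ∈ temp.primeFactors, (q - 1) := by
  fun_induction loopA with
  | case1 result temp i hg hmod ih =>
    have hidvd : i ∣ temp := Nat.dvd_of_mod_eq_zero hmod
    have hiprime : i.Prime := prime_of_dvd_min i temp (by omega) hidvd ht hmin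
    have hiF : i ∈ temp.primeFactors := Nat.mem_primeFactors.mpr ⟨hiprime, hidvd, by omega⟩
    have hpf' : (removeFac temp i).primeFactors = temp.primeFactors.erase i :=
      removeFac_primeFactors temp i hiprime ht
    have hprimes : ∀ q ∈ temp.primeFactors, q.Prime := fun q hq => Nat.prime_of_mem_primeFactors hq
    have hradF : ∏ q ∈ temp.primeFactors, q = i * ∏ q ∈ temp.primeFactors.erase i, q :=
      (Finset.mul_prod_erase _ _ hiF).symm
    have hpos' : 0 < ∏ q ∈ temp.primeFactors.erase i, q :=
      prod_primeFactors_pos _ (fun q hq => hprimes q (Finset.mem_of_mem_erase hq))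
    obtain ⟨c, hc⟩ := hdvd
    have hresult' : result * (i - 1) / i = (∏ q ∈ temp.primeFactors.erase i, q) * (c * (i - 1)) := by
      rw [hc, hradF]
      rw [show i * (∏ q ∈ temp.primeFactors.erase i, q) * c * (i - 1)
            = i * ((∏ q ∈ temp.primeFactors.erase i, q) * (c * (i - 1))) by ring]
      exact Nat.mul_div_cancel_left _ (by omega)
    have hmin' : ∀ q ∈ (removeFac temp i).primeFactors, i + 2 ≤ q := by
      intro q hq
      rw [hpf'] at hq
      obtain ⟨hqne, hqF⟩ := Finset.mem_erase.mp hq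
      have h1 : i ≤ q := hmin q hqF
      have hqprime : q.Prime := hprimes q hqF
      have h2 : q ≠ i + 1 := by
        rintro rfl
        have heven : Even (i + 1) := by
          rcases hodd with ⟨k, hk⟩; exact ⟨k + 1, by omega⟩
        have := hqprime.even_iff.mp heven
        omega
      omega
    have hdvd' : (∏ q ∈ (removeFac temp i).primeFactors, q) ∣ result * (i - 1) / i := by
      rw [hpf', hresult']; exact Dvd.intro _ rfl
    have hodd' : Odd (i + 2) := by rcases hodd with ⟨k, hk⟩; exact ⟨k + 1, by omega⟩
    have hih := ih hodd' (by omega) (removeFac_pos temp i ht) hmin' hdvd'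
    rw [hih, hpf', hresult']
    rw [Nat.mul_div_cancel_left _ hpos']
    rw [hc, hradF]
    rw [show i * (∏ q ∈ temp.primeFactors.erase i, q) * c
          = i * (∏ q ∈ temp.primeFactors.erase i, q) * c by rfl]
    rw [Nat.mul_div_cancel_left _ (by positivity : 0 < i * ∏ q ∈ temp.primeFactors.erase i, q)]
    rw [← Finset.mul_prod_erase _ (fun q => q - 1) hiF]
    ring
  | case2 result temp i hg hmod ih =>
    have hmin' : ∀ q ∈ temp.primeFactors, i + 2 ≤ q := by
      intro q hq
      have h1 : i ≤ q := hmin q hq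
      have hqprime : q.Prime := Nat.prime_of_mem_primeFactors hq
      have h2 : q ≠ i := by
        rintro rfl
        exact hmod (Nat.mod_eq_zero_of_dvd (Nat.dvd_of_mem_primeFactors hq))
      have h3 : q ≠ i + 1 := by
        rintro rfl
        have heven : Even (i + 1) := by
          rcases hodd with ⟨k, hk⟩; exact ⟨k + 1, by omega⟩
        have := hqprime.even_iff.mp heven
        omega
      omega
    have hodd' : Odd (i + 2) := by rcases hodd with ⟨k, hk⟩; exact ⟨k + 1, by omega⟩
    have hih := ih hodd' (by omega) ht hmin' hdvd
    rw [hih]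
  | case3 result temp i hg =>
    rcases Nat.lt_or_ge 1 temp with h1 | h1
    · have htprime : temp.Prime := by
        by_contra hnp
        have hsq := Nat.minFac_sq_le_self (by omega) hnp
        have hmem : temp.minFac ∈ temp.primeFactors :=
          Nat.mem_primeFactors.mpr ⟨Nat.minFac_prime (by omega), Nat.minFac_dvd temp, by omega⟩
        have h2 := hmin _ hmem
        have h3 : ¬ i * i ≤ temp := by omega
        have : i * i ≤ temp.minFac * temp.minFac := Nat.mul_le_mul h2 h2
        nlinarith
      rw [htprime.primeFactors, Finset.prod_singleton, Finset.prod_singleton]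
      rw [htprime.primeFactors, Finset.prod_singleton] at hdvd
      obtain ⟨c, hc⟩ := hdvd
      rw [hc]
      rw [show temp * c * (temp - 1) = temp * (c * (temp - 1)) by ring]
      rw [Nat.mul_div_cancel_left _ (by omega), Nat.mul_div_cancel_left _ (by omega)]
      simp [h1]
    · have ht1 : temp = 1 := by omega
      subst ht1
      simp

theorem eulerTotientA_eq_phiS (n : ℕ) : eulerTotientA n = phiS n := by
  by_cases hn : n ≤ 1
  · interval_cases n <;> simp [eulerTotientA, phiS]
  · have hn0 : 0 < n := by omega
    by_cases h2 : n % 2 = 0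
    · have h2d : (2 : ℕ) ∣ n := Nat.dvd_of_mod_eq_zero h2
      have h2F : 2 ∈ n.primeFactors := Nat.mem_primeFactors.mpr ⟨Nat.prime_two, h2d, by omega⟩
      have hpf' : (removeFac n 2).primeFactors = n.primeFactors.erase 2 :=
        removeFac_primeFactors n 2 Nat.prime_two hn0
      set R : ℕ := ∏ q ∈ n.primeFactors, q with hR
      set R' : ℕ := ∏ q ∈ n.primeFactors.erase 2, q with hR'
      set Q : ℕ := ∏ q ∈ n.primeFactors, (q - 1) with hQ
      set Q' : ℕ := ∏ q ∈ n.primeFactors.erase 2, (q - 1) with hQ'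
      have hrad : R = 2 * R' := (Finset.mul_prod_erase _ _ h2F).symm
      have hQrad : Q = (2 - 1) * Q' := (Finset.mul_prod_erase _ (fun q => q - 1) h2F).symm
      have hR'pos : 0 < R' := prod_primeFactors_pos _
        (fun q hq => Nat.prime_of_mem_primeFactors (Finset.mem_of_mem_erase hq))
      obtain ⟨c, hc⟩ : R ∣ n := Nat.prod_primeFactors_dvd n
      have hres : n * (2 - 1) / 2 = R' * c := by
        rw [hc, hrad, show 2 * R' * c * (2 - 1) = 2 * (R' * c) by ring]
        exact Nat.mul_div_cancel_left _ (by omega)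
      have hmin : ∀ q ∈ (removeFac n 2).primeFactors, 3 ≤ q := by
        intro q hq
        rw [hpf'] at hq
        obtain ⟨hqne, hqF⟩ := Finset.mem_erase.mp hq
        have := (Nat.prime_of_mem_primeFactors hqF).two_le
        omega
      have hdvd2 : (∏ q ∈ (removeFac n 2).primeFactors, q) ∣ n * (2 - 1) / 2 := by
        rw [hpf', ← hR', hres]
        exact dvd_mul_right R' c
      have hspec := loopA_spec (n * (2 - 1) / 2) (removeFac n 2) 3 (by decide) le_rfl
        (removeFac_pos n 2 hn0) hmin hdvd2
      simp only [eulerTotientA, if_neg (show ¬ n ≤ 1 by omega), h2, if_true]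
      rw [hspec, hpf', ← hR', ← hQ', hres, Nat.mul_div_cancel_left _ hR'pos]
      unfold phiS
      rw [← hR, ← hQ, hc, Nat.mul_div_cancel_left _ (by omega : 0 < R), hQrad]
      ring
    · have hmin : ∀ q ∈ n.primeFactors, 3 ≤ q := by
        intro q hq
        have hq2 := (Nat.prime_of_mem_primeFactors hq).two_le
        have : q ≠ 2 := by
          rintro rfl
          exact h2 (Nat.mod_eq_zero_of_dvd (Nat.dvd_of_mem_primeFactors hq))
        omega
      have hspec := loopA_spec n n 3 (by decide) le_rfl hn0 hmin (Nat.prod_primeFactors_dvd n)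
      simp only [eulerTotientA, if_neg (show ¬ n ≤ 1 by omega), if_neg h2]
      rw [hspec]
      rfl

-- B-side ghost sequences: the state of rem[i]/phi[i] for d = lo+i after trial factor b
def remSeq (d : ℕ) : ℕ → ℕ
  | 0 => d
  | b + 1 => (removeCnt (remSeq d b) (b + 1)).1

def phiSeq (d : ℕ) : ℕ → ℕ
  | 0 => 1
  | b + 1 =>
    if 1 < b + 1 ∧ remSeq d b % (b + 1) = 0 then
      phiSeq d b * ((b + 1 - 1) * (b + 1) ^ ((removeCnt (remSeq d b) (b + 1)).2 - 1))
    else phiSeq d b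

theorem removeCnt_spec (t p : ℕ) (hp : 2 ≤ p) (ht : 0 < t) :
    t = p ^ (removeCnt t p).2 * (removeCnt t p).1 ∧ ¬ p ∣ (removeCnt t p).1 ∧
      0 < (removeCnt t p).1 := by
  fun_induction removeCnt with
  | case1 t h ih =>
    obtain ⟨h1, h2, h3⟩ := ih (Nat.div_pos (Nat.le_of_dvd h.2.1 (Nat.dvd_of_mod_eq_zero h.2.2)) (by omega))
    refine ⟨?_, h2, h3⟩
    have hdvd : p ∣ t := Nat.dvd_of_mod_eq_zero h.2.2
    calc t = t / p * p := (Nat.div_mul_cancel hdvd).symm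
      _ = p ^ (removeCnt (t / p) p).2 * (removeCnt (t / p) p).1 * p := by rw [← h1]
      _ = p ^ ((removeCnt (t / p) p).2 + 1) * (removeCnt (t / p) p).1 := by
          rw [pow_succ]; ring
  | case2 t h =>
    refine ⟨by simp, ?_, ht⟩
    intro hd
    exact h ⟨hp, ht, Nat.mod_eq_zero_of_dvd hd⟩

theorem totient_removeCnt (t p : ℕ) (hp : p.Prime) (ht : 0 < t) (hd : p ∣ t) :
    Nat.totient t = ((p - 1) * p ^ ((removeCnt t p).2 - 1)) * Nat.totient (removeCnt t p).1 := by
  obtain ⟨heq, hnd, hpos⟩ := removeCnt_spec t p hp.two_le ht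
  have he : 0 < (removeCnt t p).2 := by
    rcases Nat.eq_zero_or_pos (removeCnt t p).2 with h0 | h
    · rw [h0, pow_zero, one_mul] at heq
      exact absurd (heq ▸ hd) hnd
    · exact h
  have hcop : Nat.Coprime (p ^ (removeCnt t p).2) (removeCnt t p).1 :=
    Nat.Coprime.pow_left _ ((Nat.Prime.coprime_iff_not_dvd hp).mpr hnd)
  calc Nat.totient t
      = Nat.totient (p ^ (removeCnt t p).2 * (removeCnt t p).1) := by rw [← heq]
    _ = Nat.totient (p ^ (removeCnt t p).2) * Nat.totient (removeCnt t p).1 :=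
        Nat.totient_mul hcop
    _ = p ^ ((removeCnt t p).2 - 1) * (p - 1) * Nat.totient (removeCnt t p).1 := by
        rw [Nat.totient_prime_pow hp he]
    _ = ((p - 1) * p ^ ((removeCnt t p).2 - 1)) * Nat.totient (removeCnt t p).1 := by ring

theorem remSeq_one (d : ℕ) : remSeq d 1 = d := by
  show (removeCnt (remSeq d 0) 1).1 = d
  rw [removeCnt, dif_neg (by rintro ⟨h, -⟩; omega)]
  rfl

theorem phiSeq_one (d : ℕ) : phiSeq d 1 = 1 := by
  show (if 1 < 0 + 1 ∧ remSeq d 0 % (0 + 1) = 0 then _ else phiSeq d 0) = 1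
  rw [if_neg (by rintro ⟨h, -⟩; omega)]
  rfl

theorem remSeq_spec (d : ℕ) (hd : 0 < d) : ∀ b,
    0 < remSeq d b ∧ remSeq d b ∣ d ∧ ∀ q, q.Prime → q ∣ remSeq d b → b < q := by
  intro b
  induction b with
  | zero => exact ⟨hd, dvd_rfl, fun q hq _ => hq.pos⟩
  | succ b ih =>
    obtain ⟨hpos, hdvd, hbound⟩ := ih
    rcases Nat.eq_zero_or_pos b with rfl | hb
    · rw [show remSeq d (0 + 1) = remSeq d 1 from rfl, remSeq_one]
      exact ⟨hd, dvd_rfl, fun q hq _ => hq.one_lt⟩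
    · obtain ⟨heq, hnd, hpos'⟩ := removeCnt_spec (remSeq d b) (b + 1) (by omega) hpos
      have hdvd' : remSeq d (b + 1) ∣ remSeq d b := by
        show (removeCnt (remSeq d b) (b + 1)).1 ∣ remSeq d b
        exact Dvd.intro_left _ heq.symm
      refine ⟨hpos', dvd_trans hdvd' hdvd, fun q hq hqd => ?_⟩
      have h1 : b < q := hbound q hq (dvd_trans hqd hdvd')
      have h2 : q ≠ b + 1 := by
        rintro rfl
        exact hnd hqd
      omega

theorem remSeq_skip (d c : ℕ) (hd : 0 < d) (hc : 1 ≤ c) (hnd : ¬ (c + 1) ∣ remSeq d c) :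
    remSeq d (c + 1) = remSeq d c ∧ phiSeq d (c + 1) = phiSeq d c := by
  constructor
  · show (removeCnt (remSeq d c) (c + 1)).1 = remSeq d c
    rw [removeCnt, dif_neg (by rintro ⟨-, -, hmod⟩; exact hnd (Nat.dvd_of_mod_eq_zero hmod))]
  · show (if 1 < c + 1 ∧ remSeq d c % (c + 1) = 0 then _ else phiSeq d c) = phiSeq d c
    rw [if_neg (by rintro ⟨-, hmod⟩; exact hnd (Nat.dvd_of_mod_eq_zero hmod))]

theorem phiSeq_totient (d : ℕ) (hd : 0 < d) : ∀ b,
    phiSeq d b * Nat.totient (remSeq d b) = Nat.totient d := by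
  intro b
  induction b with
  | zero => exact Nat.one_mul _
  | succ b ih =>
    obtain ⟨hpos, hdvd, hbound⟩ := remSeq_spec d hd b
    by_cases hcond : 1 < b + 1 ∧ remSeq d b % (b + 1) = 0
    · have hbdvd : (b + 1) ∣ remSeq d b := Nat.dvd_of_mod_eq_zero hcond.2
      have hbprime : (b + 1).Prime := by
        have h1 : (b + 1).minFac.Prime := Nat.minFac_prime (by omega)
        have h2 : (b + 1).minFac ∣ remSeq d b := dvd_trans (Nat.minFac_dvd _) hbdvd
        have h3 := hbound _ h1 h2
        have h4 : (b + 1).minFac ≤ b + 1 := Nat.minFac_le (by omega)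
        exact Nat.prime_def_minFac.mpr ⟨by omega, by omega⟩
      have hstep := totient_removeCnt (remSeq d b) (b + 1) hbprime hpos hbdvd
      show (if 1 < b + 1 ∧ remSeq d b % (b + 1) = 0 then
          phiSeq d b * ((b + 1 - 1) * (b + 1) ^ ((removeCnt (remSeq d b) (b + 1)).2 - 1))
        else phiSeq d b) * Nat.totient ((removeCnt (remSeq d b) (b + 1)).1) = Nat.totient d
      rw [if_pos hcond, mul_assoc, ← hstep]
      exact ih
    · rcases Nat.eq_zero_or_pos b with rfl | hb
      · show phiSeq d 1 * Nat.totient (remSeq d 1) = Nat.totient d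
        rw [remSeq_one, phiSeq_one, Nat.one_mul]
      · have hnd : ¬ (b + 1) ∣ remSeq d b := by
          intro hdd
          exact hcond ⟨by omega, Nat.mod_eq_zero_of_dvd hdd⟩
        obtain ⟨hr, hph⟩ := remSeq_skip d b hd hb hnd
        rw [hr, hph]
        exact ih

theorem tail_totient (x r E : ℕ) (hx : 0 < x) (hE : x ≤ E) (hr : E < (r + 1) * (r + 1))
    (hb : ∀ q, q.Prime → q ∣ x → r < q) :
    (if 1 < x then x - 1 else 1) = Nat.totient x := by
  by_cases h1 : 1 < x
  · have hxp : x.Prime := by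
      by_contra hnp
      have hsq := Nat.minFac_sq_le_self (by omega) hnp
      have hq := Nat.minFac_prime (show x ≠ 1 by omega)
      have h2 := hb _ hq (Nat.minFac_dvd x)
      have h3 : (r + 1) * (r + 1) ≤ x.minFac * x.minFac := Nat.mul_le_mul (by omega) (by omega)
      rw [pow_two] at hsq
      omega
    rw [if_pos h1, Nat.totient_prime hxp]
  · have hx1 : x = 1 := by omega
    subst hx1
    simp

theorem phiS_eq_totient (n : ℕ) : phiS n = Nat.totient n := by
  unfold phiS
  exact (Nat.totient_eq_div_primeFactors_mul n).symm

theorem isqrtLoop_gt (e r0 : ℕ) : e < (isqrtLoop e r0 + 1) * (isqrtLoop e r0 + 1) := by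
  fun_induction isqrtLoop with
  | case1 r h ih => exact ih
  | case2 r h => omega

theorem isqrtLoop_ge (e r0 : ℕ) : r0 ≤ isqrtLoop e r0 := by
  fun_induction isqrtLoop with
  | case1 r h ih => omega
  | case2 r h => omega

-- first multiple of p at or above lo
theorem m0_facts (lo p : ℕ) (hp : 2 ≤ p) (hlo : 1 ≤ lo) :
    p ∣ (lo + p - 1) / p * p ∧ lo ≤ (lo + p - 1) / p * p ∧
      ∀ x, lo ≤ x → p ∣ x → (lo + p - 1) / p * p ≤ x := by
  have hdm := Nat.div_add_mod (lo + p - 1) p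
  have hrlt : (lo + p - 1) % p < p := Nat.mod_lt _ (by omega)
  have hcomm : (lo + p - 1) / p * p = p * ((lo + p - 1) / p) := Nat.mul_comm _ _
  refine ⟨dvd_mul_left p _, by omega, ?_⟩
  rintro x hx ⟨q, rfl⟩
  have hqp : p * q = q * p := Nat.mul_comm p q
  by_contra hgt
  have hql : q + 1 ≤ (lo + p - 1) / p := by
    by_contra hq2
    have : (lo + p - 1) / p ≤ q := by omega
    have := Nat.mul_le_mul_right p this
    omega
  have := Nat.mul_le_mul_right p hql
  have hexp : (q + 1) * p = p * q + p := by ring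
  omega

theorem innerB_spec (p lo hi : ℕ) (hp : 2 ≤ p) (hlo : 1 ≤ lo) :
    ∀ (rem phi : List ℕ) (m : ℕ), p ∣ m → lo ≤ m →
    rem.length = hi + 1 - lo → phi.length = hi + 1 - lo →
    (∀ j, j < hi + 1 - lo →
      rem.getD j 0 = (if p ∣ (lo + j) ∧ lo + j < m then remSeq (lo + j) p else remSeq (lo + j) (p - 1)) ∧
      phi.getD j 0 = (if p ∣ (lo + j) ∧ lo + j < m then phiSeq (lo + j) p else phiSeq (lo + j) (p - 1))) →
    ((innerB rem phi p m lo hi).1.length = hi + 1 - lo ∧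
      (innerB rem phi p m lo hi).2.length = hi + 1 - lo) ∧
    ∀ j, j < hi + 1 - lo →
      (innerB rem phi p m lo hi).1.getD j 0
        = (if p ∣ (lo + j) then remSeq (lo + j) p else remSeq (lo + j) (p - 1)) ∧
      (innerB rem phi p m lo hi).2.getD j 0
        = (if p ∣ (lo + j) then phiSeq (lo + j) p else phiSeq (lo + j) (p - 1)) := by
  intro rem phi m
  fun_induction innerB with
  | case1 rem phi m h hx ih =>
    intro hdm hlom hlr hlp hinv
    have hi0 : m - lo < hi + 1 - lo := by omega
    have hd : lo + (m - lo) = m := by omega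
    have hrem_i : rem.getD (m - lo) 0 = remSeq m (p - 1) := by
      have := (hinv (m - lo) hi0).1
      rw [hd, if_neg (by rintro ⟨-, hlt⟩; omega)] at this
      exact this
    have hpe : p - 1 + 1 = p := by omega
    have hremstep : remSeq m p = (removeCnt (remSeq m (p - 1)) p).1 := by
      conv_lhs => rw [← hpe]
      rw [show remSeq m (p - 1 + 1) = (removeCnt (remSeq m (p - 1)) (p - 1 + 1)).1 from rfl, hpe]
    have hphistep : phiSeq m p = phiSeq m (p - 1) * ((p - 1) * p ^ ((removeCnt (remSeq m (p - 1)) p).2 - 1)) := by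
      conv_lhs => rw [← hpe]
      rw [show phiSeq m (p - 1 + 1) = (if 1 < p - 1 + 1 ∧ remSeq m (p - 1) % (p - 1 + 1) = 0 then
          phiSeq m (p - 1) * ((p - 1 + 1 - 1) * (p - 1 + 1) ^ ((removeCnt (remSeq m (p - 1)) (p - 1 + 1)).2 - 1))
        else phiSeq m (p - 1)) from rfl, hpe]
      rw [if_pos ⟨by omega, by rw [← hrem_i]; exact hx⟩]
    apply ih (dvd_add hdm dvd_rfl) (by omega) (by simp [hlr]) (by simp [hlp])
    intro j hj
    by_cases hji : j = m - lo
    · subst hji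
      constructor
      · have hset : (rem.set (m - lo) (removeCnt (rem.getD (m - lo) 0) p).1).getD (m - lo) 0
            = (removeCnt (rem.getD (m - lo) 0) p).1 := by
          rw [List.getD_eq_getElem _ _ (by simp [hlr]; omega), List.getElem_set_self]
        rw [hset, hd, if_pos ⟨by rw [← hd] at hdm; exact (by rwa [hd] at hdm), by omega⟩,
          hremstep, hrem_i]
      · have hset : (phi.set (m - lo) (phi.getD (m - lo) 0
            * ((p - 1) * p ^ ((removeCnt (rem.getD (m - lo) 0) p).2 - 1)))).getD (m - lo) 0
            = phi.getD (m - lo) 0 * ((p - 1) * p ^ ((removeCnt (rem.getD (m - lo) 0) p).2 - 1)) := by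
          rw [List.getD_eq_getElem _ _ (by simp [hlp]; omega), List.getElem_set_self]
        have hphi_i : phi.getD (m - lo) 0 = phiSeq m (p - 1) := by
          have := (hinv (m - lo) hi0).2
          rw [hd, if_neg (by rintro ⟨-, hlt⟩; omega)] at this
          exact this
        rw [hset, hd, if_pos ⟨hdm, by omega⟩, hphistep, hphi_i, hrem_i]
    · have hsr : (rem.set (m - lo) (removeCnt (rem.getD (m - lo) 0) p).1).getD j 0 = rem.getD j 0 := by
        simp only [List.getD_eq_getElem?_getD, List.getElem?_set_ne (show m - lo ≠ j by omega)]
      have hsp : (phi.set (m - lo) (phi.getD (m - lo) 0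
          * ((p - 1) * p ^ ((removeCnt (rem.getD (m - lo) 0) p).2 - 1)))).getD j 0 = phi.getD j 0 := by
        simp only [List.getD_eq_getElem?_getD, List.getElem?_set_ne (show m - lo ≠ j by omega)]
      rw [hsr, hsp]
      obtain ⟨h1, h2⟩ := hinv j hj
      by_cases hcond : p ∣ (lo + j)
      · have hiff : lo + j < m ↔ lo + j < m + p := by
          constructor
          · intro; omega
          · intro hlt2
            by_contra hge
            have hsub : p ∣ lo + j - m := Nat.dvd_sub hcond hdm
            have hpos : 0 < lo + j - m := by omega
            have := Nat.le_of_dvd hpos hsub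
            omega
        constructor
        · rw [h1]
          by_cases hlt : lo + j < m
          · rw [if_pos ⟨hcond, hlt⟩, if_pos ⟨hcond, by omega⟩]
          · rw [if_neg (by tauto), if_neg (by rw [← hiff] at *; tauto)]
        · rw [h2]
          by_cases hlt : lo + j < m
          · rw [if_pos ⟨hcond, hlt⟩, if_pos ⟨hcond, by omega⟩]
          · rw [if_neg (by tauto), if_neg (by rw [← hiff] at *; tauto)]
      · exact ⟨by rw [h1, if_neg (by tauto), if_neg (by tauto)],
          by rw [h2, if_neg (by tauto), if_neg (by tauto)]⟩
  | case2 rem phi m h hx ih =>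
    intro hdm hlom hlr hlp hinv
    have hi0 : m - lo < hi + 1 - lo := by omega
    have hd : lo + (m - lo) = m := by omega
    have hrem_i : rem.getD (m - lo) 0 = remSeq m (p - 1) := by
      have := (hinv (m - lo) hi0).1
      rw [hd, if_neg (by rintro ⟨-, hlt⟩; omega)] at this
      exact this
    apply ih (dvd_add hdm dvd_rfl) (by omega) hlr hlp
    intro j hj
    obtain ⟨h1, h2⟩ := hinv j hj
    by_cases hji : j = m - lo
    · subst hji
      have hpe : p - 1 + 1 = p := by omega
      have hnd : ¬ (p - 1 + 1) ∣ remSeq m (p - 1) := by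
        rw [hpe]
        intro hdd
        exact hx (by rw [hrem_i]; exact Nat.mod_eq_zero_of_dvd hdd)
      have hd0 : 0 < m := by omega
      obtain ⟨hr, hph⟩ := remSeq_skip m (p - 1) hd0 (by omega) hnd
      rw [hpe] at hr hph
      constructor
      · rw [h1, hd, if_neg (by rintro ⟨-, hlt⟩; omega), if_pos ⟨hdm, by omega⟩, hr]
      · rw [h2, hd, if_neg (by rintro ⟨-, hlt⟩; omega), if_pos ⟨hdm, by omega⟩, hph]
    · by_cases hcond : p ∣ (lo + j)
      · have hiff : lo + j < m ↔ lo + j < m + p := by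
          constructor
          · intro; omega
          · intro hlt2
            by_contra hge
            have hne : lo + j ≠ m := by
              intro heq
              apply hji
              omega
            have hsub : p ∣ lo + j - m := Nat.dvd_sub hcond hdm
            have hpos : 0 < lo + j - m := by omega
            have := Nat.le_of_dvd hpos hsub
            omega
        constructor
        · rw [h1]
          by_cases hlt : lo + j < m
          · rw [if_pos ⟨hcond, hlt⟩, if_pos ⟨hcond, by omega⟩]
          · rw [if_neg (by tauto), if_neg (by rw [← hiff] at *; tauto)]
        · rw [h2]
          by_cases hlt : lo + j < m
          · rw [if_pos ⟨hcond, hlt⟩, if_pos ⟨hcond, by omega⟩]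
          · rw [if_neg (by tauto), if_neg (by rw [← hiff] at *; tauto)]
      · exact ⟨by rw [h1, if_neg (by tauto), if_neg (by tauto)],
          by rw [h2, if_neg (by tauto), if_neg (by tauto)]⟩
  | case3 rem phi m h =>
    intro hdm hlom hlr hlp hinv
    refine ⟨⟨hlr, hlp⟩, fun j hj => ?_⟩
    have hm : hi < m := by omega
    obtain ⟨h1, h2⟩ := hinv j hj
    by_cases hcond : p ∣ (lo + j)
    · exact ⟨by rw [h1, if_pos ⟨hcond, by omega⟩, if_pos hcond],
        by rw [h2, if_pos ⟨hcond, by omega⟩, if_pos hcond]⟩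
    · exact ⟨by rw [h1, if_neg (by tauto), if_neg hcond],
        by rw [h2, if_neg (by tauto), if_neg hcond]⟩

theorem foldB_spec (lo hi : ℕ) (hlo : 2 ≤ lo) : ∀ (k c : ℕ) (rem phi : List ℕ), 2 ≤ c →
    rem.length = hi + 1 - lo → phi.length = hi + 1 - lo →
    (∀ j, j < hi + 1 - lo →
      rem.getD j 0 = remSeq (lo + j) (c - 1) ∧ phi.getD j 0 = phiSeq (lo + j) (c - 1)) →
    (((List.range' c k).foldl
        (fun (st : List ℕ × List ℕ) p => innerB st.1 st.2 p ((lo + p - 1) / p * p) lo hi)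
        (rem, phi)).1.length = hi + 1 - lo ∧
     ((List.range' c k).foldl
        (fun (st : List ℕ × List ℕ) p => innerB st.1 st.2 p ((lo + p - 1) / p * p) lo hi)
        (rem, phi)).2.length = hi + 1 - lo) ∧
    ∀ j, j < hi + 1 - lo →
      ((List.range' c k).foldl
        (fun (st : List ℕ × List ℕ) p => innerB st.1 st.2 p ((lo + p - 1) / p * p) lo hi)
        (rem, phi)).1.getD j 0 = remSeq (lo + j) (c + k - 1) ∧
      ((List.range' c k).foldl
        (fun (st : List ℕ × List ℕ) p => innerB st.1 st.2 p ((lo + p - 1) / p * p) lo hi)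
        (rem, phi)).2.getD j 0 = phiSeq (lo + j) (c + k - 1) := by
  intro k
  induction k with
  | zero =>
    intro c rem phi hc hlr hlp hinv
    simpa using ⟨⟨hlr, hlp⟩, hinv⟩
  | succ k ihk =>
    intro c rem phi hc hlr hlp hinv
    rw [List.range'_succ, List.foldl_cons]
    obtain ⟨hm0dvd, hm0ge, hm0min⟩ := m0_facts lo c hc (by omega)
    have hinner := innerB_spec c lo hi hc (by omega) rem phi ((lo + c - 1) / c * c) hm0dvd hm0ge hlr hlp ?_
    · have hstep : ∀ j, j < hi + 1 - lo →
          (innerB rem phi c ((lo + c - 1) / c * c) lo hi).1.getD j 0 = remSeq (lo + j) (c + 1 - 1) ∧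
          (innerB rem phi c ((lo + c - 1) / c * c) lo hi).2.getD j 0 = phiSeq (lo + j) (c + 1 - 1) := by
        intro j hj
        obtain ⟨h1, h2⟩ := hinner.2 j hj
        rw [show c + 1 - 1 = c by omega]
        by_cases hcond : c ∣ (lo + j)
        · rw [h1, h2, if_pos hcond, if_pos hcond]
          exact ⟨rfl, rfl⟩
        · have hnd : ¬ c ∣ remSeq (lo + j) (c - 1) := by
            intro hdd
            obtain ⟨-, hdvd, -⟩ := remSeq_spec (lo + j) (by omega) (c - 1)
            exact hcond (dvd_trans hdd hdvd)
          have hpe : c - 1 + 1 = c := by omega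
          obtain ⟨hr, hph⟩ := remSeq_skip (lo + j) (c - 1) (by omega) (by omega) (by rwa [hpe])
          rw [hpe] at hr hph
          rw [h1, h2, if_neg hcond, if_neg hcond, ← hr, ← hph]
          exact ⟨rfl, rfl⟩
      have := ihk (c + 1) (innerB rem phi c ((lo + c - 1) / c * c) lo hi).1
        (innerB rem phi c ((lo + c - 1) / c * c) lo hi).2 (by omega)
        hinner.1.1 hinner.1.2 hstep
      rw [show c + 1 + k - 1 = c + (k + 1) - 1 by omega] at this
      exact this
    · intro j hj
      obtain ⟨h1, h2⟩ := hinv j hj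
      rw [h1, h2, if_neg, if_neg]
      · exact ⟨rfl, rfl⟩
      · rintro ⟨hdvd, hlt⟩
        have := hm0min (lo + j) (by omega) hdvd
        omega
      · rintro ⟨hdvd, hlt⟩
        have := hm0min (lo + j) (by omega) hdvd
        omega

theorem foldl_add_map (f : ℕ → ℕ) : ∀ (l : List ℕ) (a : ℕ),
    l.foldl (fun t d => t + f d) a = a + (l.map f).sum := by
  intro l
  induction l with
  | nil => intro a; simp
  | cons x xs ih => intro a; simp [ih, Nat.add_assoc]

theorem count_reduced_fractions_range_spec : Claim_equal_count_reduced_fractions_range := by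
  intro start end_ _
  unfold Spec_count_reduced_fractions_range count_reduced_fractions_range
    count_reduced_fractions_range_alt
  by_cases hlt : end_ < (if start < 2 then 2 else start)
  · simp only [if_pos hlt]
  · simp only [if_neg hlt]
    congr 1
    set s : ℕ := (if start < 2 then 2 else start).toNat with hs
    set e : ℕ := end_.toNat with he
    have hs2 : 2 ≤ s := by rw [hs]; split_ifs <;> omega
    have hse : s ≤ e := by rw [hs, he]; split_ifs at hlt ⊢ <;> omega
    set r : ℕ := isqrtLoop e 0 with hr
    have hsq : e < (r + 1) * (r + 1) := hr ▸ isqrtLoop_gt e 0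
    have hr1 : 1 ≤ r := by
      rw [hr, isqrtLoop, if_pos (by omega : (0 + 1) * (0 + 1) ≤ e)]
      exact isqrtLoop_ge e (0 + 1)
    have hfold := foldB_spec s e hs2 (r + 1 - 2) 2 (List.range' s (e + 1 - s))
      (List.replicate (e + 1 - s) 1) le_rfl (by simp) (by simp) ?_
    · obtain ⟨-, hget⟩ := hfold
      rw [show 2 + (r + 1 - 2) - 1 = r by omega] at hget
      rw [foldl_add_map eulerTotientA, foldl_add_map _, Nat.zero_add, Nat.zero_add]
      refine congrArg List.sum (List.ext_getElem (by simp) ?_)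
      intro i h1 h2
      simp only [List.getElem_map, List.getElem_range, List.getElem_range']
      have hb : i < e + 1 - s := by simpa using h1
      obtain ⟨hrem, hphi⟩ := hget i hb
      rw [hrem, hphi]
      obtain ⟨hpos, hdvd, hbound⟩ := remSeq_spec (s + i) (by omega) r
      have hle : remSeq (s + i) r ≤ e := le_trans (Nat.le_of_dvd (by omega) hdvd) (by omega)
      have htail := tail_totient (remSeq (s + i) r) r e hpos hle hsq hbound
      rw [htail, eulerTotientA_eq_phiS, phiS_eq_totient, show s + 1 * i = s + i by ring]
      exact (phiSeq_totient (s + i) (by omega) r).symm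
    · intro j hj
      constructor
      · rw [List.getD_eq_getElem _ _ (by simp; omega), List.getElem_range',
          show (2 : ℕ) - 1 = 1 from rfl, remSeq_one, Nat.one_mul]
      · rw [List.getD_eq_getElem _ _ (by simp; omega), List.getElem_replicate,
          show (2 : ℕ) - 1 = 1 from rfl, phiSeq_one]
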